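-- pv_equiv track=rewrite | github.com/RufinoSalgado21/HealthBarriers | python/web_scrapper.py | lstrip_until
-- ===== SOURCE A (Python) =====
-- def lstrip_until(string, character):
--     flag = '>'
--     a = string
--     for c in list(a):
--         a = a.lstrip(c)
--         if c == flag:
--             break
--     return a
-- ===== SOURCE B (Python) =====
-- def lstrip_until(string, character):
--     # single left-to-right scan: skip to the first '>', stay through its run,
--     # return the suffix at the first char after that run ('character' unused, as in A)
--     seen = False
--     for i, ch in enumerate(string):
--         if ch == '>':
--             seen = True
--         elif seen:
--             return string[i:]
--     return ""
-- ===== Notes on version B (the rewrite author's own statement) =====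
-- stated objective: faster
-- what changed: Replaces A's per-original-character loop that rebuilds the string with lstrip each iteration by a single indexed scan with a boolean flag that returns the suffix right after the leading run of '>'.
import Mathlib
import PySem

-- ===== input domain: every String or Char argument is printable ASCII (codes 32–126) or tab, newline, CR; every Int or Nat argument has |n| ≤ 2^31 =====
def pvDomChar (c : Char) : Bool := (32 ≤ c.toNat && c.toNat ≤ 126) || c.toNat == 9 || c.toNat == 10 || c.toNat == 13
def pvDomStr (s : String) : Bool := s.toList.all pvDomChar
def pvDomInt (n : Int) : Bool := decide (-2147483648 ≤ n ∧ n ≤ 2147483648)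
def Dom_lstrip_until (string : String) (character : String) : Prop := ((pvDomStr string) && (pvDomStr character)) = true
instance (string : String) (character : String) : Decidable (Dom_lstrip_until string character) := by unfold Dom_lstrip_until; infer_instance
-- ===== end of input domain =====

-- B replaces A's repeated per-character lstrip loop by a single indexed scan with a
-- boolean flag (objective: simpler); same return value on every input.

-- ===== PORT A =====
-- the loop `for c in list(a): a = a.lstrip(c); if c == flag: break`;
-- `a.lstrip(c)` for a single character c is exactly dropWhile (· == c) on the code points (hand port, exact)
def lstripUntilLoop : List Char → List Char → List Char
  | [], a => a
  | c :: cs, a =>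
      let a' := a.dropWhile (· == c)
      if c == '>' then a' else lstripUntilLoop cs a'

def lstrip_until (string : String) (character : String) : String :=
  -- flag = '>'; a = string; for c in list(a): …; return a
  String.mk (lstripUntilLoop string.toList string.toList)

-- ===== PORT B =====
-- the loop `for i, ch in enumerate(string): …` with the boolean flag `seen`
def scanLoop (s : List Char) : List (Int × Char) → Bool → String
  | [], _ => ""
  | (i, ch) :: rest, seen =>
      if ch == '>' then scanLoop s rest true
      else if seen then String.mk (PySem.List.slice s (some i) none)   -- return string[i:]
      else scanLoop s rest seen

def lstrip_until_alt (string : String) (character : String) : String :=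
  scanLoop string.toList (PySem.List.enumerate string.toList 0) false

-- ===== PRECONDITION & SPEC =====
def Spec_lstrip_until (string : String) (character : String) (out : String) : Prop := out = lstrip_until_alt string character
instance (string : String) (character : String) (out : String) : Decidable (Spec_lstrip_until string character out) := by unfold Spec_lstrip_until; infer_instance

-- ===== CLAIM (what is proved, stated in full; the proofs are below) =====
def Claim_equal_lstrip_until : Prop := ∀ (string : String) (character : String), Dom_lstrip_until string character → Spec_lstrip_until string character (lstrip_until string character)

-- ===== LEMMAS AND PROOFS =====

-- common characterisation: the suffix after the leading run of '>' that starts at the first '>'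
def specDrop (a : List Char) : List Char :=
  (a.dropWhile (fun x => x != '>')).dropWhile (fun x => x == '>')

-- stripping a run of a non-'>' character does not change where the first '>' scan stops
theorem dropWhile_ne_of_dropWhile_eq (a : List Char) (c : Char) (hc : c ≠ '>') :
    (a.dropWhile (fun x => x == c)).dropWhile (fun x => x != '>')
      = a.dropWhile (fun x => x != '>') := by
  induction a with
  | nil => rfl
  | cons h t ih =>
    by_cases hhc : h = c
    · subst hhc
      simp [hc, ih]
    · simp [List.dropWhile_cons, hhc]

theorem specDrop_dropWhile (a : List Char) (c : Char) (hc : c ≠ '>') :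
    specDrop (a.dropWhile (fun x => x == c)) = specDrop a := by
  unfold specDrop
  rw [dropWhile_ne_of_dropWhile_eq a c hc]

theorem lstripUntilLoop_spec : ∀ (cs u a : List Char), cs = u ++ a → (∀ x ∈ u, x ≠ '>') →
    lstripUntilLoop cs a = specDrop a := by
  intro cs
  induction cs with
  | nil =>
    intro u a h hu
    have hu0 : u = [] := by cases u <;> simp_all
    have ha0 : a = [] := by simp_all
    subst hu0; subst ha0; rfl
  | cons c cs' ih =>
    intro u a h hu
    by_cases hcg : c = '>'
    · subst hcg
      -- u must be empty, so a = '>' :: cs'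
      have hu0 : u = [] := by
        cases u with
        | nil => rfl
        | cons x u' =>
          exfalso
          have hx : '>' = x := by simpa using congrArg (fun l => l.head?) h
          exact hu x (by simp) hx.symm
      subst hu0
      simp only [List.nil_append] at h
      subst h
      simp [lstripUntilLoop, specDrop]
    · -- c ≠ '>' branch
      have hstep : lstripUntilLoop (c :: cs') a = lstripUntilLoop cs' (a.dropWhile (fun x => x == c)) := by
        simp [lstripUntilLoop, hcg]
      rw [hstep]
      rw [show specDrop a = specDrop (a.dropWhile (fun x => x == c)) from (specDrop_dropWhile a c hcg).symm]
      cases u with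
      | nil =>
        simp only [List.nil_append] at h
        subst h
        refine ih (cs'.takeWhile (fun x => x == c)) _ ?_ ?_
        · have hdw : (c :: cs').dropWhile (fun x => x == c) = cs'.dropWhile (fun x => x == c) := by
            simp
          rw [hdw, List.takeWhile_append_dropWhile (p := fun x => x == c) (l := cs')]
        · intro y hy
          have hpy := List.mem_takeWhile_imp hy
          simp only [beq_iff_eq] at hpy
          simpa [hpy] using hcg
      | cons x u' =>
        have hcs' : cs' = u' ++ a := by simpa using congrArg List.tail h
        refine ih (u' ++ a.takeWhile (fun x => x == c)) _ ?_ ?_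
        · rw [hcs', List.append_assoc]
          congr 1
          exact (List.takeWhile_append_dropWhile (p := fun x => x == c) (l := a)).symm
        · intro y hy
          rcases List.mem_append.mp hy with hy' | hy'
          · exact hu y (by simp [hy'])
          · have hpy := List.mem_takeWhile_imp hy'
            simp only [beq_iff_eq] at hpy
            simpa [hpy] using hcg

theorem scanLoop_true (s : List Char) : ∀ (t : List Char) (i : Nat), s.drop i = t →
    scanLoop s (PySem.List.enumerate t (i : Int)) true
      = String.mk (t.dropWhile (fun x => x == '>')) := by
  intro t
  induction t with
  | nil => intro i _; rfl
  | cons ch t' ih =>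
    intro i hdrop
    have hdrop' : s.drop (i + 1) = t' := by
      rw [← List.tail_drop, hdrop]; rfl
    have hcast : ((i : Int) + 1) = ((i + 1 : Nat) : Int) := by push_cast; ring
    by_cases hch : ch = '>'
    · subst hch
      simp only [PySem.List.enumerate_cons, scanLoop, hcast]
      rw [ih (i + 1) hdrop']
      simp
    · simp only [PySem.List.enumerate_cons, scanLoop]
      rw [PySem.List.slice_from_natCast, hdrop]
      simp [hch]

theorem scanLoop_false (s : List Char) : ∀ (t : List Char) (i : Nat), s.drop i = t →
    scanLoop s (PySem.List.enumerate t (i : Int)) false = String.mk (specDrop t) := by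
  intro t
  induction t with
  | nil => intro i _; rfl
  | cons ch t' ih =>
    intro i hdrop
    have hdrop' : s.drop (i + 1) = t' := by
      rw [← List.tail_drop, hdrop]; rfl
    have hcast : ((i : Int) + 1) = ((i + 1 : Nat) : Int) := by push_cast; ring
    by_cases hch : ch = '>'
    · subst hch
      simp only [PySem.List.enumerate_cons, scanLoop, hcast]
      rw [scanLoop_true s t' (i + 1) hdrop']
      simp [specDrop]
    · simp only [PySem.List.enumerate_cons, scanLoop, hcast]
      rw [if_neg (by simp [hch]), if_neg (by simp), ih (i + 1) hdrop']
      simp [specDrop, hch]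

-- ===== VERDICT (by name: the statement is the Claim_ definition above) =====
theorem lstrip_until_spec : Claim_equal_lstrip_until := by
  intro string character _
  unfold Spec_lstrip_until lstrip_until lstrip_until_alt
  rw [lstripUntilLoop_spec string.toList [] string.toList rfl (by simp)]
  have := scanLoop_false string.toList string.toList 0 (by simp)
  simpa using this.symm
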